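-- pv_equiv track=rewrite | github.com/guilhermedlroncato/python_coursera | parte2/exercicios/semana_1/soma_matriz.py | dimensoes
-- ===== SOURCE A (Python) =====
-- def dimensoes(matriz):
--     linhas = 0
--     colunas = 0
--     i = 0
--
--     for i in matriz:
--         linhas += 1
--         colunas = len(i)
--
--     return [linhas,colunas]
-- ===== SOURCE B (Python) =====
-- def dimensoes(matriz):
--     # Closed form: rows = len; columns = length of the LAST row (A overwrites
--     # colunas each iteration), 0 for the empty matrix.
--     return [len(matriz), len(matriz[-1]) if matriz else 0]
-- ===== Notes on version B (the rewrite author's own statement) =====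
-- stated objective: simpler
-- what changed: Replaces the counting/overwriting loop with a closed-form expression: len(matriz) for rows and len(matriz[-1]) (0 if empty) for columns.
import Mathlib
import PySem

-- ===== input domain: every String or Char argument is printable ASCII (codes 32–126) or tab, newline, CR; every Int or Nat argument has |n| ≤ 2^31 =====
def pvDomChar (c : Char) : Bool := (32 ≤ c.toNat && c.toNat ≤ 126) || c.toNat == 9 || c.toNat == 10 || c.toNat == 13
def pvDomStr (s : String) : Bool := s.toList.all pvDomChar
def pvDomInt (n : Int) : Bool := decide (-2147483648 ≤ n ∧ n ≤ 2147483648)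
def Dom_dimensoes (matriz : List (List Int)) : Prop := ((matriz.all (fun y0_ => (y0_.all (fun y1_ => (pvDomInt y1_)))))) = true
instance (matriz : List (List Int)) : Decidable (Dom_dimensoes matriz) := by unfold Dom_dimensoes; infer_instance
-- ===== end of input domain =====

-- ===== PORT A =====
-- Header: B returns [rows, columns] in closed form (last row's length) instead of A's loop; objective: simpler.
def dimensoes (matriz : List (List Int)) : List Int :=
  let st := matriz.foldl (fun (p : Int × Int) i => (p.1 + 1, (i.length : Int))) (0, 0)
  [st.1, st.2]

-- ===== PORT B =====
def dimensoes_alt (matriz : List (List Int)) : List Int :=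
  -- matriz[-1] ported exactly via PySem.List.pyGet?; none ↔ the 'if matriz else 0' branch
  [(matriz.length : Int),
   match PySem.List.pyGet? matriz (-1) with
   | some r => (r.length : Int)
   | none => 0]

-- ===== PRECONDITION & SPEC =====
def Spec_dimensoes (matriz : List (List Int)) (out : List Int) : Prop := out = dimensoes_alt matriz
instance (matriz : List (List Int)) (out : List Int) : Decidable (Spec_dimensoes matriz out) := by unfold Spec_dimensoes; infer_instance

-- ===== CLAIM (what is proved, stated in full; the proofs are below) =====
def Claim_equal_dimensoes : Prop := ∀ (matriz : List (List Int)), Dom_dimensoes matriz → Spec_dimensoes matriz (dimensoes matriz)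

-- ===== LEMMAS AND PROOFS =====

-- ===== VERDICT (by name: the statement is the Claim_ definition above) =====
theorem fold_dim (matriz : List (List Int)) (a : Int) (c : Int) :
    matriz.foldl (fun (p : Int × Int) i => (p.1 + 1, (i.length : Int))) (a, c)
      = (a + matriz.length,
         match matriz.getLast? with
         | some r => (r.length : Int)
         | none => c) := by
  induction matriz generalizing a c with
  | nil => simp
  | cons h t ih =>
    simp only [List.foldl_cons, ih]
    cases t with
    | nil => simp
    | cons h2 t2 =>
      refine Prod.ext (by push_cast; simp; ring) ?_
      simp only [List.getLast?_cons_cons]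
      cases hg : (h2 :: t2).getLast? with
      | none => simp [List.getLast?_eq_none_iff] at hg
      | some r => rfl

theorem dimensoes_spec : Claim_equal_dimensoes := by
  intro matriz _
  unfold Spec_dimensoes dimensoes dimensoes_alt
  simp [fold_dim, PySem.List.pyGet?, PySem.List.pyIdx?]
  cases h : matriz.getLast? with
  | none => simp_all [List.getLast?_eq_none_iff]
  | some r =>
    have hne : matriz ≠ [] := by rintro rfl; simp at h
    cases matriz with
    | nil => simp at h
    | cons x t => simp_all [List.getLast?_eq_getElem?]
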